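-- pv_equiv track=rewrite | github.com/Adel-Hart/gwatamCompetition | code/main.py | Most2
-- ===== SOURCE A (Python) =====
-- def Most2(obj): #입력은 딕셔너리로 받음, 2번째로 큰 값 구하는 함수v
--     buffer = list(obj.values()) #파라미터로 받은 딕셔너리 값 모음을 리스트로
--     res = sorted(buffer, reverse=True) #리스트를 큰 순으로 정렬
--     if len(res) > 1: #최댓값을 비교할 수 있을만큼 자료가 있을때(2개 이상 존재)
--         for i in range(len(res)-1):
--             if res[i+1] == res[0]:
--                 pass
--             elif res[i+1] < res[0]: #맨 처음값을 지웠는데 맨 처음 값과 같은 값이 있으면 건너 뛰고 다음 값을 찾는다.(최종적으로 처음 값보다 바로 다음으로 작은 값 구함)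
--                 temp = [k for k, v in obj.items()  if v == res[i+1]] #해당 값(두번째로 큰 값)을 가진 와이파이 이름을 리스트 형태로 반환.
--                 final ='' #최종값
--                 for j in range(len(temp)):
--                     final += 'SEC_NAME : ' + temp[j] + '    SEC_SPEED : ' + obj[temp[j]] + '\n'
--                 return final
--         return
--     else:
--         return
-- ===== SOURCE B (Python) =====
-- def Most2(obj):
--     # second-largest distinct value via set+sort, then one pass over items
--     distinct = sorted(set(obj.values()), reverse=True)
--     if len(distinct) < 2:
--         return None
--     second = distinct[1]
--     out = ''
--     for name, speed in obj.items():
--         if speed == second: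
--             out += 'SEC_NAME : ' + name + '    SEC_SPEED : ' + speed + '\n'
--     return out
-- ===== Notes on version B (the rewrite author's own statement) =====
-- stated objective: simpler
-- what changed: A sorts all values descending and scans index pairs skipping duplicates of the maximum to find the runner-up, then re-collects matching keys and looks each key up again; B computes the distinct values once (set + sort), indexes the runner-up directly, and builds the output in a single pass over the items without any dict lookups.
import Mathlib
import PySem

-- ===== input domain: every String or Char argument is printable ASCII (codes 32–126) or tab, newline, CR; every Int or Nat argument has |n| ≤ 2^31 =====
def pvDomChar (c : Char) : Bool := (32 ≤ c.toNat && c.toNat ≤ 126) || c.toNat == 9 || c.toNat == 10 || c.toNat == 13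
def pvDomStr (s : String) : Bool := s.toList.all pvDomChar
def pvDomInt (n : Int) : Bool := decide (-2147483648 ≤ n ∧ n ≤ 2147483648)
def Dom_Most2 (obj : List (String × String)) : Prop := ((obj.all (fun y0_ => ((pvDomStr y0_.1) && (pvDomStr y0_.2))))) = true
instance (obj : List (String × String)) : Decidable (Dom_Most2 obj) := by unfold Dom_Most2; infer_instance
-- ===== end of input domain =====

-- B computes the distinct values once (set + sort) and indexes the runner-up directly, instead of
-- A's index scan over the full sorted value list; simpler, no dict lookups while building the output.

-- ===== PORT A =====
-- the body at the found index: temp + the j-loop accumulating `final`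
def pvBuildA (d : PySem.Dict String String) (v : String) : String :=
  let temp := (d.items.filter (fun p => p.2 == v)).map (fun p => p.1)
  (PySem.List.pyRange 0 (PySem.List.len temp)).foldl
    (fun acc j =>
      acc ++ ("SEC_NAME : " ++ PySem.List.pyGetD temp j "" ++ "    SEC_SPEED : "
        ++ d.getD (PySem.List.pyGetD temp j "") "" ++ "\n")) ""

-- the 'for i in range(len(res)-1)' loop with its early return
def pvLoopA (d : PySem.Dict String String) (res : List String) : List Int → Option String
  | [] => none
  | i :: rest =>
    if PySem.List.pyGetD res (i + 1) "" == PySem.List.pyGetD res 0 "" then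
      pvLoopA d res rest
    else if PySem.List.pyGetD res (i + 1) "" < PySem.List.pyGetD res 0 "" then
      some (pvBuildA d (PySem.List.pyGetD res (i + 1) ""))
    else
      pvLoopA d res rest

def Most2 (obj : List (String × String)) : Option String :=
  let d := PySem.Dict.ofList obj
  let buffer := d.values
  let res := PySem.List.sorted buffer (fun x => x) true
  if res.length > 1 then
    pvLoopA d res (PySem.List.pyRange 0 (PySem.List.len res - 1))
  else
    none

-- ===== PORT B =====
def Most2_alt (obj : List (String × String)) : Option String :=
  let d := PySem.Dict.ofList obj
  let distinct := PySem.List.sorted (PySem.Set.ofList d.values) (fun x => x) true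
  if distinct.length < 2 then
    none
  else
    let second := PySem.List.pyGetD distinct 1 ""
    some (d.items.foldl
      (fun out p =>
        if p.2 == second then
          out ++ ("SEC_NAME : " ++ p.1 ++ "    SEC_SPEED : " ++ p.2 ++ "\n")
        else out) "")

-- ===== PRECONDITION & SPEC =====
def Spec_Most2 (obj : List (String × String)) (out : Option String) : Prop := out = Most2_alt obj
instance (obj : List (String × String)) (out : Option String) : Decidable (Spec_Most2 obj out) := by unfold Spec_Most2; infer_instance

-- ===== CLAIM (what is proved, stated in full; the proofs are below) =====
def Claim_equal_Most2 : Prop := ∀ (obj : List (String × String)), Dom_Most2 obj → Spec_Most2 obj (Most2 obj)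

-- ===== LEMMAS AND PROOFS =====

-- Set.add-folds only append: the accumulator is a prefix and the new part is a sublist of the input
theorem pv_foldl_add_append (t : List String) : ∀ (s : List String),
    ∃ u, t.foldl PySem.Set.add s = s ++ u ∧ u.Sublist t := by
  induction t with
  | nil => intro s; exact ⟨[], by simp, List.Sublist.refl _⟩
  | cons x t ih =>
    intro s
    simp only [List.foldl_cons, PySem.Set.add]
    by_cases h : PySem.Set.contains s x = true
    · obtain ⟨u, hu, hs⟩ := ih s
      rw [if_pos h]
      exact ⟨u, hu, hs.cons x⟩
    · obtain ⟨u, hu, hs⟩ := ih (s ++ [x])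
      rw [if_neg h]
      exact ⟨x :: u, by simpa using hu, hs.cons₂ x⟩

-- head of the part a Set.add-fold appends = first element not already in the accumulator
theorem pv_foldl_add_head (t : List String) : ∀ (s : PySem.Set String),
    ((t.foldl PySem.Set.add s).drop s.length).head? =
      (t.dropWhile (fun x => PySem.Set.contains s x)).head? := by
  induction t with
  | nil => intro s; simp
  | cons x t ih =>
    intro s
    simp only [List.foldl_cons, PySem.Set.add, List.dropWhile_cons]
    by_cases h : PySem.Set.contains s x = true
    · rw [if_pos h, if_pos h]; exact ih s
    · rw [if_neg h, if_neg h]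
      obtain ⟨u, hu, -⟩ := pv_foldl_add_append t (s ++ [x])
      rw [hu, List.append_assoc, List.drop_left]
      simp

-- A's index loop, on a list whose head is maximal, returns the first value below the head
theorem pv_loopA_eq (d : PySem.Dict String String) (res : List String)
    (hall : ∀ x ∈ res, x ≤ PySem.List.pyGetD res 0 "") :
    ∀ (fuel i : Nat), res.length ≤ i + 1 + fuel →
    pvLoopA d res (PySem.List.pyRange (i : Int) ((res.length : Int) - 1)) =
      ((res.drop (i + 1)).dropWhile (fun x => x == PySem.List.pyGetD res 0 "")).head?.map
        (pvBuildA d) := by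
  intro fuel
  induction fuel with
  | zero =>
    intro i hle
    rw [PySem.List.pyRange_one_eq_nil (by omega)]
    rw [List.drop_eq_nil_of_le (by omega)]
    rfl
  | succ fuel ih =>
    intro i hle
    by_cases hlt : i + 2 ≤ res.length
    · have hcons : PySem.List.pyRange (i : Int) ((res.length : Int) - 1)
          = (i : Int) :: PySem.List.pyRange ((i : Int) + 1) ((res.length : Int) - 1) :=
        PySem.List.pyRange_one_cons (by omega)
      rw [hcons]
      have hidx : i + 1 < res.length := by omega
      have hget : PySem.List.pyGetD res ((i : Int) + 1) "" = res[i + 1] := by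
        rw [show ((i : Int) + 1) = ((i + 1 : Nat) : Int) by push_cast; ring,
          PySem.List.pyGetD_natCast, List.getD_eq_getElem _ _ hidx]
      have hdrop : res.drop (i + 1) = res[i + 1] :: res.drop (i + 2) :=
        List.drop_eq_getElem_cons hidx
      rw [pvLoopA]
      rw [hget, hdrop, List.dropWhile_cons]
      by_cases heq : res[i+1] = PySem.List.pyGetD res 0 ""
      · have hb : (res[i+1] == PySem.List.pyGetD res 0 "") = true := by simpa using heq
        rw [if_pos hb, if_pos hb]
        have := ih (i + 1) (by omega)
        rw [show ((i : Int) + 1) = ((i + 1 : Nat) : Int) by push_cast; ring]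
        simpa using this
      · have hb : ¬ ((res[i+1] == PySem.List.pyGetD res 0 "") = true) := by simpa using heq
        rw [if_neg hb, if_neg hb]
        have hx : res[i+1] ≤ PySem.List.pyGetD res 0 "" := hall _ (List.getElem_mem hidx)
        rw [if_pos (lt_of_le_of_ne hx heq)]
        simp only [List.head?_cons, Option.map_some]
    · rw [PySem.List.pyRange_one_eq_nil (by omega)]
      rw [List.drop_eq_nil_of_le (by omega)]
      rfl

-- the two output-string builders agree (keys of the dict are nodup, so A's lookup returns p.2)
theorem pv_build_eq (d : PySem.Dict String String) (hnd : d.keys.Nodup) (s : String) :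
    pvBuildA d s = d.items.foldl
      (fun out p =>
        if p.2 == s then
          out ++ ("SEC_NAME : " ++ p.1 ++ "    SEC_SPEED : " ++ p.2 ++ "\n")
        else out) "" := by
  unfold pvBuildA
  rw [PySem.List.foldl_pyRange_pyGetD _ ""
    (fun acc x => acc ++ ("SEC_NAME : " ++ x ++ "    SEC_SPEED : " ++ d.getD x "" ++ "\n"))
    "" (le_refl 0)]
  rw [Int.toNat_zero, List.drop_zero, List.foldl_map]
  have hr := PySem.List.foldl_if_eq_foldl_filter (fun (p : String × String) => p.2 == s)
    (fun out p => out ++ ("SEC_NAME : " ++ p.1 ++ "    SEC_SPEED : " ++ p.2 ++ "\n")) d.items ""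
  rw [hr]
  apply PySem.List.foldl_congr_mem
  intro acc p hp
  have hpi : p ∈ d.items := List.mem_of_mem_filter hp
  have hv : p.2 = s := by simpa using List.of_mem_filter hp
  have hg : d.getD p.1 "" = p.2 := PySem.Dict.getD_of_mem_items d (by simpa using hpi) hnd ""
  rw [hg, hv]

-- ===== VERDICT (by name: the statement is the Claim_ definition above) =====
theorem Most2_spec : Claim_equal_Most2 := by
  intro obj _
  unfold Spec_Most2 Most2 Most2_alt
  dsimp only
  set d := PySem.Dict.ofList obj with hd
  set vals := d.values with hvals
  set res := PySem.List.sorted vals (fun x => x) true with hres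
  set ds := PySem.List.sorted (PySem.Set.ofList vals) (fun x => x) true with hds
  have hlenres : res.length = vals.length := PySem.List.length_sorted vals (fun x => x) true
  have hlends : ds.length = (PySem.Set.ofList vals : List String).length :=
    PySem.List.length_sorted _ (fun x => x) true
  obtain ⟨u0, hu0, hsub0⟩ := pv_foldl_add_append vals []
  have hofl : (PySem.Set.ofList vals : List String) = u0 := by
    simpa [PySem.Set.ofList, PySem.Set.empty] using hu0
  by_cases h1 : res.length > 1
  · -- the interesting branch
    rw [if_pos h1]
    obtain ⟨m0, t, hmt⟩ : ∃ m0 t, res = m0 :: t := by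
      cases hr : res with
      | nil => rw [hr] at h1; simp at h1
      | cons a l => exact ⟨a, l, rfl⟩
    have hm0 : PySem.List.pyGetD res 0 "" = m0 := by
      rw [hmt, PySem.List.pyGetD_ofNat']; rfl
    have hpw : List.Pairwise (fun a b => b ≤ a) res :=
      PySem.List.sorted_pairwise_rev vals (fun x => x)
    have hall : ∀ x ∈ res, x ≤ PySem.List.pyGetD res 0 "" := by
      rw [hm0]
      intro x hx
      rw [hmt] at hx hpw
      rcases List.mem_cons.mp hx with h | h
      · exact le_of_eq h
      · exact (List.pairwise_cons.mp hpw).1 x h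
    have hA := pv_loopA_eq d res hall res.length 0 (by omega)
    have hlen0 : PySem.List.len res = (res.length : Int) := rfl
    rw [show ((0 : Nat) : Int) = (0 : Int) by rfl] at hA
    rw [hlen0, hA, hm0]
    rw [hmt]
    simp only [List.drop_succ_cons, List.drop_zero]
    -- B's distinct list is the dedup of res
    have hnodup_res : (PySem.Set.ofList res : List String).Nodup := PySem.Set.nodup_ofList res
    have hperm : (PySem.Set.ofList res : List String).Perm (PySem.Set.ofList vals) := by
      rw [List.perm_ext_iff_of_nodup hnodup_res (PySem.Set.nodup_ofList vals)]
      intro a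
      rw [PySem.Set.mem_ofList, PySem.Set.mem_ofList]
      exact (PySem.List.sorted_perm vals (fun x => x) true).mem_iff
    obtain ⟨ur, hur, hsubr⟩ := pv_foldl_add_append res []
    have hoflr : (PySem.Set.ofList res : List String) = ur := by
      simpa [PySem.Set.ofList, PySem.Set.empty] using hur
    have hsubr' : (PySem.Set.ofList res : List String).Sublist res := by
      rw [hoflr]; exact hsubr
    have hgt : List.Pairwise (fun a b => b < a) (PySem.Set.ofList res : List String) := by
      have hge : List.Pairwise (fun a b => b ≤ a) (PySem.Set.ofList res : List String) :=
        hpw.sublist hsubr'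
      have := hge.and hnodup_res
      exact this.imp (fun {a b} h => lt_of_le_of_ne h.1 (Ne.symm h.2))
    have hdseq : ds = (PySem.Set.ofList res : List String) :=
      PySem.List.sorted_rev_eq_of_perm_of_pairwise_gt _ _ (fun x => x) hperm hgt
    -- second element of the dedup = first element of t differing from m0
    have hstep : (PySem.Set.ofList res : List String) = t.foldl PySem.Set.add [m0] := by
      rw [hmt]; rfl
    obtain ⟨ut, hut, -⟩ := pv_foldl_add_append t [m0]
    have hsecond : ut.head? = (t.dropWhile (fun x => x == m0)).head? := by
      have hh := pv_foldl_add_head t [m0]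
      rw [hut] at hh
      simp only [List.length_cons, List.length_nil, List.drop_succ_cons, List.drop_zero,
        List.singleton_append] at hh
      rw [hh]
      have hpred : (fun x => PySem.Set.contains [m0] x) = (fun x => x == m0) := by
        funext x
        show List.contains [m0] x = (x == m0)
        rw [List.contains_cons]
        simp
      rw [hpred]
    rw [hdseq, hstep, hut]
    cases hdw : t.dropWhile (fun x => x == m0) with
    | nil =>
      have : ut = [] := by
        rw [← List.head?_eq_none_iff, hsecond, hdw]; rfl
      rw [this]
      simp
    | cons y ys =>
      obtain ⟨ut', hut'⟩ : ∃ ut', ut = y :: ut' := by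
        cases hu : ut with
        | nil => rw [hu] at hsecond; rw [hdw] at hsecond; simp at hsecond
        | cons a l =>
          rw [hu] at hsecond; rw [hdw] at hsecond
          simp only [List.head?_cons, Option.some.injEq] at hsecond
          exact ⟨l, by rw [hsecond]⟩
      rw [hut']
      rw [if_neg (by simp)]
      have hsec : PySem.List.pyGetD ([m0] ++ y :: ut') 1 "" = y := by
        rw [PySem.List.pyGetD_ofNat']; rfl
      rw [hsec]
      simp only [List.head?_cons, Option.map_some]
      rw [pv_build_eq d (PySem.Dict.nodup_keys_ofList obj) y]
  · -- len(res) <= 1 : both return None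
    rw [if_neg h1]
    have hle : (PySem.Set.ofList vals : List String).length ≤ vals.length := by
      rw [hofl]
      simpa using hsub0.length_le
    rw [if_pos (by omega)]
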